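-- pv_equiv track=rewrite | github.com/jiseong99/coding_study | 프로그래머스/lv0/120891. 369게임/369게임.py | solution
-- ===== SOURCE A (Python) =====
-- def solution(order):
--     answer = 0
--     a=['3','6','9']
--     str_order=str(order)
--     str_order.split()
--     for i in str_order:
--         if i in a:
--             answer+=1
--     return answer
-- ===== SOURCE B (Python) =====
-- def solution(order):
--     n = abs(order)
--     answer = 0
--     while n:
--         d = n % 10
--         if d in (3, 6, 9):
--             answer += 1
--         n //= 10
--     return answer
-- ===== Notes on version B (the rewrite author's own statement) =====
-- stated objective: idiomatic
-- what changed: Replaces the string conversion and character-membership scan with a modular-arithmetic loop that peels off one decimal digit per iteration and keeps a running count of the target digits directly.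
import Mathlib
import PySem

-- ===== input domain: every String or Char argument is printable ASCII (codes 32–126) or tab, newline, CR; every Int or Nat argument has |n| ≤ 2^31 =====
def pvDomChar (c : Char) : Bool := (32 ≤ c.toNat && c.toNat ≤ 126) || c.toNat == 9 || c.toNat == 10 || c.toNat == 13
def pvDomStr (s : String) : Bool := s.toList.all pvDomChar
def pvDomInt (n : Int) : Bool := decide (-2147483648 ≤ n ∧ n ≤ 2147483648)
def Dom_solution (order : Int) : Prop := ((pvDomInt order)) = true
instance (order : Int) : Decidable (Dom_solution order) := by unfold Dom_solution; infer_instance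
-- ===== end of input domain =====

-- B replaces A's string conversion and character scan by a modular-arithmetic digit-peeling loop (idiomatic; same cost).


-- ===== PORT A =====
def solution (order : Int) : Int :=
  let answer : Int := 0
  let a : List Char := ['3', '6', '9']
  let str_order : String := PySem.Int.toStr order
  let _ := PySem.Str.split₀ str_order   -- A calls str_order.split() and discards the result
  str_order.toList.foldl (fun answer i => if i ∈ a then answer + 1 else answer) answer

-- ===== PORT B =====
-- the `while n:` loop of Source B, one decimal digit per step
def solutionAltLoop (n : Nat) (answer : Int) : Int :=
  if n = 0 then answer
  else
    let d := n % 10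
    solutionAltLoop (n / 10) (if d = 3 ∨ d = 6 ∨ d = 9 then answer + 1 else answer)
termination_by n
decreasing_by exact Nat.div_lt_self (Nat.pos_of_ne_zero (by assumption)) (by norm_num)

def solution_alt (order : Int) : Int :=
  solutionAltLoop order.natAbs 0

-- ===== PRECONDITION & SPEC =====
def Spec_solution (order : Int) (out : Int) : Prop := out = solution_alt order
instance (order : Int) (out : Int) : Decidable (Spec_solution order out) := by unfold Spec_solution; infer_instance

-- ===== CLAIM (what is proved, stated in full; the proofs are below) =====
def Claim_equal_solution : Prop := ∀ (order : Int), Dom_solution order → Spec_solution order (solution order)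

-- ===== LEMMAS AND PROOFS =====

-- count of '3','6','9' characters, as an Int
def cnt369 (l : List Char) : Int := (l.countP (fun c => c ∈ (['3', '6', '9'] : List Char)) : Int)

theorem cnt369_cons (c : Char) (l : List Char) :
    cnt369 (c :: l) = cnt369 l + (if c ∈ (['3', '6', '9'] : List Char) then 1 else 0) := by
  simp [cnt369, List.countP_cons]

theorem foldl_cnt (l : List Char) (ans : Int) :
    l.foldl (fun answer i => if i ∈ (['3', '6', '9'] : List Char) then answer + 1 else answer) ans
      = ans + cnt369 l := by
  induction l generalizing ans with
  | nil => simp [cnt369]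
  | cons c l ih =>
    rw [List.foldl_cons, ih, cnt369_cons]
    split_ifs <;> ring

theorem loop_zero (ans : Int) : solutionAltLoop 0 ans = ans := by
  rw [solutionAltLoop]; simp

theorem loop_ne (n : Nat) (h : n ≠ 0) (ans : Int) :
    solutionAltLoop n ans
      = solutionAltLoop (n / 10) (if n % 10 = 3 ∨ n % 10 = 6 ∨ n % 10 = 9 then ans + 1 else ans) := by
  rw [solutionAltLoop]; simp [h]

theorem loop_acc (n : Nat) (ans : Int) :
    solutionAltLoop n ans = ans + solutionAltLoop n 0 := by
  induction n using Nat.strong_induction_on generalizing ans with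
  | _ n ih =>
    by_cases h : n = 0
    · simp [h, loop_zero]
    · rw [loop_ne n h ans, loop_ne n h 0]
      have hlt : n / 10 < n := Nat.div_lt_self (Nat.pos_of_ne_zero h) (by norm_num)
      rw [ih _ hlt, ih _ hlt (ans := if n % 10 = 3 ∨ n % 10 = 6 ∨ n % 10 = 9 then (0:Int) + 1 else 0)]
      split_ifs <;> ring

theorem digitChar_369 (m : Nat) (hm : m < 10) :
    (if Nat.digitChar m ∈ (['3', '6', '9'] : List Char) then (1:Int) else 0)
      = (if m = 3 ∨ m = 6 ∨ m = 9 then 1 else 0) := by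
  interval_cases m <;> decide

theorem core_loop (fuel : Nat) : ∀ n ds, n < fuel →
    cnt369 (Nat.toDigitsCore 10 fuel n ds) = solutionAltLoop n (cnt369 ds) := by
  induction fuel with
  | zero => intro n ds h; omega
  | succ f ih =>
    intro n ds h
    by_cases h0 : n = 0
    · subst h0
      rw [Nat.toDigitsCore, solutionAltLoop]
      norm_num [cnt369_cons, Nat.digitChar]
      exact ⟨by decide, by decide, by decide⟩
    · have hd : n % 10 < 10 := Nat.mod_lt _ (by norm_num)
      rw [Nat.toDigitsCore]
      rw [solutionAltLoop]
      simp only [h0, if_false]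
      by_cases hq : n / 10 = 0
      · simp only [hq, if_true]
        rw [solutionAltLoop]
        simp only [if_true]
        rw [cnt369_cons, digitChar_369 _ hd]
        split_ifs <;> ring
      · simp only [hq, if_false]
        have hlt : n / 10 < f := by
          have := Nat.div_lt_self (Nat.pos_of_ne_zero h0) (show 1 < 10 by norm_num)
          omega
        rw [ih _ _ hlt, cnt369_cons, digitChar_369 _ hd]
        rw [loop_acc (n / 10), loop_acc (n / 10)
          (ans := if n % 10 = 3 ∨ n % 10 = 6 ∨ n % 10 = 9 then cnt369 ds + 1 else cnt369 ds)]
        split_ifs <;> ring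

theorem cnt_toDigits (n : Nat) : cnt369 (Nat.toDigits 10 n) = solutionAltLoop n 0 := by
  have := core_loop (n + 1) n [] (by omega)
  simpa [Nat.toDigits, cnt369] using this

-- ===== VERDICT (by name: the statement is the Claim_ definition above) =====
theorem solution_spec : Claim_equal_solution := by
  intro order _
  show solution order = solution_alt order
  unfold solution solution_alt
  rw [foldl_cnt]
  rw [PySem.Int.toList_toStr]
  unfold PySem.Int.toChars
  by_cases h : order < 0
  · simp only [h, if_true]
    rw [cnt369_cons]
    rw [if_neg (by decide : ¬ ('-' : Char) ∈ (['3','6','9'] : List Char))]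
    rw [cnt_toDigits]
    ring
  · simp only [h, if_false]
    rw [show order.toNat = order.natAbs by omega, cnt_toDigits]
    ring
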